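-- pv_equiv track=rewrite | github.com/ajonaed/Prep | code/SlidingWindow/SmallestSubArrayWithSumK.py | smallest_subarray_with_given_sum_brute_force
-- ===== SOURCE A (Python) =====
-- import math
--
-- def smallest_subarray_with_given_sum_brute_force(s, arr):
--     min_length = math.inf
--
--     for start in range(len(arr)):
--         current_sum = 0
--         for end in range(start, len(arr)):
--             current_sum += arr[end]
--             if current_sum >= s:
--                 min_length = min(min_length, end - start + 1)
--                 break  # No need to keep going, it will only get longer
--
--     return min_length if min_length != math.inf else 0
-- ===== SOURCE B (Python) =====
-- def smallest_subarray_with_given_sum_brute_force(s, arr):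
--     n = len(arr)
--     prefix = [0]
--     total = 0
--     for x in arr:
--         total += x
--         prefix.append(total)
--     # search lengths from shortest to longest; the first length that admits
--     # a window with sum >= s is the answer
--     for length in range(1, n + 1):
--         if any(prefix[j] - prefix[j - length] >= s for j in range(length, n + 1)):
--             return length
--     return 0
-- ===== Notes on version B (the rewrite author's own statement) =====
-- stated objective: alternative
-- what changed: Instead of scanning each start position with a running sum and a break, B precomputes prefix sums once and searches window lengths in increasing order, returning the first length for which some window reaches sum >= s.
import Mathlib
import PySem

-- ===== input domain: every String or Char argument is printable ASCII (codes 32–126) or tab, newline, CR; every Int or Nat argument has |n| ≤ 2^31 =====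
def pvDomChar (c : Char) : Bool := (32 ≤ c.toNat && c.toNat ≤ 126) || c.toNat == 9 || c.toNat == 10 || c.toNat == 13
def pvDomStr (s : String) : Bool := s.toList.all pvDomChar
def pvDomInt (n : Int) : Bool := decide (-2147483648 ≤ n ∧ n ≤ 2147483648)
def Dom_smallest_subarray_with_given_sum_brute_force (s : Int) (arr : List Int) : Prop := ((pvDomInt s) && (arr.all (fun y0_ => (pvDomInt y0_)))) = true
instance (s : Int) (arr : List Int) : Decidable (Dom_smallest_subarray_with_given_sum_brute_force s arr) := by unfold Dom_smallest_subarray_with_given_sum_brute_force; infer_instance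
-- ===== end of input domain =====

-- B replaces A's per-start scan (running sum + break) by a prefix-sum table and a
-- shortest-first search over window lengths; objective: alternative (same worst-case cost).


-- ===== PORT A =====
-- min(min_length, v) with min_length : Option Int standing for math.inf when none
def pvOptMin (ml : Option Int) (v : Int) : Option Int :=
  match ml with
  | none => some v
  | some m => some (min m v)

-- inner loop: 'for end in range(start, len(arr)): current_sum += arr[end]; if current_sum >= s: …; break'
def pyAInner (s : Int) (arr : List Int) (start : Int) (ml : Option Int) :
    List Int → Int → Option Int
  | [], _ => ml
  | e :: rest, cs =>
      let cs' := cs + PySem.List.pyGetD arr e 0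
      if s ≤ cs' then pvOptMin ml (e - start + 1)
      else pyAInner s arr start ml rest cs'

-- outer loop: 'for start in range(len(arr)): current_sum = 0; …'
def pyAOuter (s : Int) (arr : List Int) : List Int → Option Int → Option Int
  | [], ml => ml
  | st :: rest, ml =>
      pyAOuter s arr rest (pyAInner s arr st ml (PySem.List.pyRange st (arr.length : Int) 1) 0)

def smallest_subarray_with_given_sum_brute_force (s : Int) (arr : List Int) : Int :=
  (pyAOuter s arr (PySem.List.pyRange 0 (arr.length : Int) 1) none).getD 0

-- ===== PORT B =====
-- 'total = 0; prefix = [0]; for x in arr: total += x; prefix.append(total)'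
def pvPrefixAux (total : Int) : List Int → List Int
  | [] => []
  | x :: rest => (total + x) :: pvPrefixAux (total + x) rest

def pvPrefix (arr : List Int) : List Int := 0 :: pvPrefixAux 0 arr

-- 'any(prefix[j] - prefix[j - length] >= s for j in range(length, n + 1))'
def pvAnyWindow (s : Int) (P : List Int) (L : Int) : List Int → Bool
  | [] => false
  | j :: rest =>
      if s ≤ PySem.List.pyGetD P j 0 - PySem.List.pyGetD P (j - L) 0 then true
      else pvAnyWindow s P L rest

-- 'for length in range(1, n + 1): if any(…): return length' / 'return 0'
def pvFirstLen (s : Int) (P : List Int) (n : Int) : List Int → Int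
  | [] => 0
  | L :: rest =>
      if pvAnyWindow s P L (PySem.List.pyRange L (n + 1) 1) then L
      else pvFirstLen s P n rest

def smallest_subarray_with_given_sum_brute_force_alt (s : Int) (arr : List Int) : Int :=
  let n : Int := arr.length
  let pre := pvPrefix arr
  pvFirstLen s pre n (PySem.List.pyRange 1 (n + 1) 1)

-- ===== PRECONDITION & SPEC =====
def Spec_smallest_subarray_with_given_sum_brute_force (s : Int) (arr : List Int) (out : Int) : Prop := out = smallest_subarray_with_given_sum_brute_force_alt s arr
instance (s : Int) (arr : List Int) (out : Int) : Decidable (Spec_smallest_subarray_with_given_sum_brute_force s arr out) := by unfold Spec_smallest_subarray_with_given_sum_brute_force; infer_instance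

-- ===== CLAIM (what is proved, stated in full; the proofs are below) =====
def Claim_equal_smallest_subarray_with_given_sum_brute_force : Prop := ∀ (s : Int) (arr : List Int), Dom_smallest_subarray_with_given_sum_brute_force s arr → Spec_smallest_subarray_with_given_sum_brute_force s arr (smallest_subarray_with_given_sum_brute_force s arr)

-- ===== LEMMAS AND PROOFS =====

-- prefix sum of the first k elements
def pvPf (arr : List Int) (k : Nat) : Int := (arr.take k).sum

-- the first end index j ∈ [i, n) with sum arr[i..j] ≥ s (where A's inner loop breaks)
def pvFirstEnd (s : Int) (arr : List Int) (i : Nat) : Option Nat :=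
  (List.range' i (arr.length - i)).find? (fun j => decide (s ≤ pvPf arr (j+1) - pvPf arr i))

-- the length A's inner loop contributes for start i
def pvHit (s : Int) (arr : List Int) (i : Nat) : Option Nat :=
  (pvFirstEnd s arr i).map (fun j => j - i + 1)

-- "some window of length L has sum ≥ s"
def pvOk (s : Int) (arr : List Int) (L : Nat) : Bool :=
  (List.range' L (arr.length + 1 - L)).any (fun j => decide (s ≤ pvPf arr j - pvPf arr (j - L)))

lemma pvPf_succ (arr : List Int) (k : Nat) (h : k < arr.length) :
    pvPf arr (k+1) = pvPf arr k + arr.getD k 0 := by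
  unfold pvPf
  rw [List.take_succ, List.sum_append]
  simp [List.getD_eq_getElem?_getD, List.getElem?_eq_getElem h]

lemma find?_range'_min {p : Nat → Bool} :
    ∀ (len a m : Nat), (List.range' a len).find? p = some m →
      ∀ k, a ≤ k → k < m → p k = false := by
  intro len
  induction len with
  | zero => intro a m h; simp at h
  | succ n ih =>
      intro a m h k hak hkm
      rw [List.range'_succ] at h
      by_cases hpa : p a
      · rw [List.find?_cons_of_pos hpa] at h
        have : a = m := by simpa using h
        omega
      · rw [List.find?_cons_of_neg hpa] at h
        rcases Nat.eq_or_lt_of_le hak with rfl | hlt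
        · simpa using hpa
        · exact ih (a+1) m h k hlt hkm

lemma find?_range'_eq_some {p : Nat → Bool} :
    ∀ (len a m : Nat), p m = true → a ≤ m → m < a + len →
      (∀ k, a ≤ k → k < m → p k = false) →
      (List.range' a len).find? p = some m := by
  intro len
  induction len with
  | zero => intro a m _ _ h; omega
  | succ n ih =>
      intro a m hpm ham hlt hmin
      rw [List.range'_succ]
      rcases Nat.eq_or_lt_of_le ham with rfl | hlt'
      · rw [List.find?_cons_of_pos hpm]
      · have hfa : p a = false := hmin a le_rfl hlt'
        rw [List.find?_cons_of_neg (by simp [hfa])]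
        exact ih (a+1) m hpm hlt' (by omega) (fun k hk1 hk2 => hmin k (by omega) hk2)

-- ----- characterisation of A's inner loop -----
lemma pyAInner_char (s : Int) (arr : List Int) (start : Nat) (ml : Option Int) :
    ∀ (cnt e : Nat), e + cnt = arr.length → start ≤ e →
      pyAInner s arr (start : Int) ml (PySem.List.pyRange (e : Int) (arr.length : Int) 1)
        (pvPf arr e - pvPf arr start)
      = match (List.range' e cnt).find?
            (fun j => decide (s ≤ pvPf arr (j+1) - pvPf arr start)) with
        | none => ml
        | some j => pvOptMin ml ((j - start + 1 : Nat) : Int) := by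
  intro cnt
  induction cnt with
  | zero =>
      intro e he _
      rw [PySem.List.pyRange_one_eq_nil (by omega)]
      simp [pyAInner]
  | succ n ih =>
      intro e he hse
      have helt : e < arr.length := by omega
      rw [PySem.List.pyRange_one_cons (by exact_mod_cast helt)]
      rw [List.range'_succ]
      have hsum : pvPf arr e - pvPf arr start + PySem.List.pyGetD arr (e : Int) 0
          = pvPf arr (e+1) - pvPf arr start := by
        rw [PySem.List.pyGetD_natCast, pvPf_succ arr e helt]; ring
      by_cases hc : s ≤ pvPf arr (e+1) - pvPf arr start
      · rw [List.find?_cons_of_pos (by simpa using hc)]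
        simp only [pyAInner]
        rw [hsum, if_pos hc]
        have : ((e : Int) - start + 1) = ((e - start + 1 : Nat) : Int) := by omega
        rw [this]
      · rw [List.find?_cons_of_neg (by simpa using hc)]
        simp only [pyAInner]
        rw [hsum, if_neg hc]
        have : ((e : Int) + 1) = ((e + 1 : Nat) : Int) := by push_cast; ring
        rw [this, ih (e+1) (by omega) (by omega)]

lemma pyAInner_hit (s : Int) (arr : List Int) (i : Nat) (hi : i ≤ arr.length) (ml : Option Int) :
    pyAInner s arr (i : Int) ml (PySem.List.pyRange (i : Int) (arr.length : Int) 1) 0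
    = match pvHit s arr i with
      | none => ml
      | some L => pvOptMin ml (L : Int) := by
  have h0 : (0 : Int) = pvPf arr i - pvPf arr i := by ring
  rw [h0, pyAInner_char s arr i ml (arr.length - i) i (by omega) le_rfl]
  unfold pvHit pvFirstEnd
  cases (List.range' i (arr.length - i)).find?
      (fun j => decide (s ≤ pvPf arr (j+1) - pvPf arr i)) <;> simp

-- ----- characterisation of A's outer loop -----
lemma pyAOuter_char (s : Int) (arr : List Int) :
    ∀ (l : List Nat) (ml : Option Int), (∀ i ∈ l, i ≤ arr.length) →
      pyAOuter s arr (l.map (fun k : Nat => (k : Int))) ml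
      = l.foldl (fun m i => match pvHit s arr i with
          | none => m
          | some L => pvOptMin m (L : Int)) ml := by
  intro l
  induction l with
  | nil => intro ml _; simp [pyAOuter]
  | cons i rest ih =>
      intro ml hmem
      simp only [List.map_cons, pyAOuter, List.foldl_cons]
      rw [pyAInner_hit s arr i (hmem i (by simp)) ml]
      exact ih _ (fun j hj => hmem j (by simp [hj]))

-- ----- the fold computes the minimum of the contributed lengths -----
lemma foldl_min_char (s : Int) (arr : List Int) :
    ∀ (l : List Nat) (ml : Option Int),
      l.foldl (fun m i => match pvHit s arr i with
          | none => m
          | some L => pvOptMin m (L : Int)) ml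
      = match (l.filterMap (pvHit s arr)).min? with
        | none => ml
        | some L => pvOptMin ml (L : Int) := by
  intro l
  induction l with
  | nil => simp
  | cons i rest ih =>
      intro ml
      simp only [List.foldl_cons, List.filterMap_cons]
      cases hh : pvHit s arr i with
      | none => rw [ih ml]
      | some L =>
          rw [ih (pvOptMin ml L)]
          cases hm : (rest.filterMap (pvHit s arr)).min? with
          | none =>
              rw [List.min?_eq_none_iff] at hm
              simp [hm]
          | some m =>
              have hcons : (L :: rest.filterMap (pvHit s arr)).min? = some (min L m) := by
                rw [List.min?_cons, hm]; rfl
              rw [hcons]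
              cases ml with
              | none => simp [pvOptMin, Nat.cast_min]
              | some v => simp [pvOptMin, Nat.cast_min, min_assoc]

-- every length A contributes is a genuine window length (with 1 ≤ L)
lemma pvHit_ok (s : Int) (arr : List Int) (i x : Nat) (hi : i < arr.length)
    (hx : pvHit s arr i = some x) : 1 ≤ x ∧ pvOk s arr x = true := by
  unfold pvHit at hx
  cases hfe : pvFirstEnd s arr i with
  | none => rw [hfe] at hx; simp at hx
  | some j =>
      rw [hfe] at hx
      simp only [Option.map_some, Option.some.injEq] at hx
      unfold pvFirstEnd at hfe
      have hp := List.find?_some hfe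
      have hmem := List.mem_of_find?_eq_some hfe
      rw [List.mem_range'_1] at hmem
      have hij : i ≤ j := hmem.1
      have hjn : j < arr.length := by omega
      simp only [decide_eq_true_eq] at hp
      constructor
      · omega
      · unfold pvOk
        rw [List.any_eq_true]
        refine ⟨j + 1, ?_, ?_⟩
        · rw [List.mem_range'_1]; omega
        · have : j + 1 - x = i := by omega
          rw [this]; simpa using hp

-- ----- the key bridge: min of A's contributions = first feasible length -----
lemma pvBridge (s : Int) (arr : List Int) :
    ((List.range arr.length).filterMap (pvHit s arr)).min?
    = (List.range' 1 arr.length).find? (fun L => pvOk s arr L) := by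
  by_cases hex : ∃ L, 1 ≤ L ∧ pvOk s arr L = true
  · classical
    have hdec : DecidablePred (fun L => 1 ≤ L ∧ pvOk s arr L = true) := fun L => by
      infer_instance
    let L0 := Nat.find hex
    have hL0 : 1 ≤ L0 ∧ pvOk s arr L0 = true := Nat.find_spec hex
    have hmin : ∀ k, k < L0 → ¬(1 ≤ k ∧ pvOk s arr k = true) := fun k hk => Nat.find_min hex hk
    obtain ⟨j, hjmem, hjp⟩ := List.any_eq_true.mp hL0.2
    rw [List.mem_range'_1] at hjmem
    have hjn : j ≤ arr.length := by omega
    have hLj : L0 ≤ j := hjmem.1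
    simp only [decide_eq_true_eq] at hjp
    -- RHS = some L0
    have hrhs : (List.range' 1 arr.length).find? (fun L => pvOk s arr L) = some L0 := by
      apply find?_range'_eq_some arr.length 1 L0 hL0.2 hL0.1 (by omega)
      intro k hk1 hk2
      by_contra hcon
      exact hmin k hk2 ⟨hk1, by simpa using hcon⟩
    rw [hrhs]
    -- LHS = some L0
    rw [List.min?_eq_some_iff']
    constructor
    · -- L0 is a contributed length: the start i := j - L0 contributes exactly L0
      set i := j - L0 with hi
      have hiL : i < arr.length := by omega
      have hfsome : ((List.range' i (arr.length - i)).find?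
          (fun j' => decide (s ≤ pvPf arr (j'+1) - pvPf arr i))).isSome := by
        rw [List.find?_isSome]
        refine ⟨j - 1, ?_, ?_⟩
        · rw [List.mem_range'_1]; omega
        · have : j - 1 + 1 = j := by omega
          rw [this]
          have : j - L0 = i := rfl
          simp only [decide_eq_true_eq]
          rw [hi]; exact hjp
      obtain ⟨j'', hj''⟩ := Option.isSome_iff_exists.mp hfsome
      have hhit : pvHit s arr i = some (j'' - i + 1) := by
        unfold pvHit pvFirstEnd; rw [hj'']; rfl
      have hok := pvHit_ok s arr i (j'' - i + 1) hiL hhit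
      have hge : L0 ≤ j'' - i + 1 := Nat.find_min' hex hok
      have hmemj'' := List.mem_of_find?_eq_some hj''
      rw [List.mem_range'_1] at hmemj''
      have hle : j'' - i + 1 ≤ L0 := by
        -- j'' is the FIRST hit, and j - 1 is a hit, so j'' ≤ j - 1
        by_contra hcon
        push_neg at hcon
        have hj1lt : j - 1 < j'' := by omega
        have := find?_range'_min (arr.length - i) i j'' hj'' (j-1) (by omega) hj1lt
        have hj1 : j - 1 + 1 = j := by omega
        rw [hj1] at this
        have : ¬ (s ≤ pvPf arr j - pvPf arr i) := by simpa using this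
        exact this (by rw [hi]; exact hjp)
      have : j'' - i + 1 = L0 := by omega
      rw [List.mem_filterMap]
      exact ⟨i, by rw [List.mem_range]; exact hiL, by rw [hhit, this]⟩
    · intro b hb
      rw [List.mem_filterMap] at hb
      obtain ⟨i, hil, hib⟩ := hb
      rw [List.mem_range] at hil
      exact Nat.find_min' hex (pvHit_ok s arr i b hil hib)
  · -- no feasible window at all: both sides are none
    push_neg at hex
    have hnone : ∀ i ∈ List.range arr.length, pvHit s arr i = none := by
      intro i hil
      rw [List.mem_range] at hil
      cases hh : pvHit s arr i with
      | none => rfl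
      | some x =>
          have := pvHit_ok s arr i x hil hh
          exact absurd this.2 (hex x this.1)
    rw [List.filterMap_eq_nil_iff.mpr hnone]
    rw [List.min?_eq_none_iff.mpr rfl]
    symm
    rw [List.find?_eq_none]
    intro L hL
    rw [List.mem_range'_1] at hL
    intro hok
    exact hex L hL.1 hok

-- ----- characterisation of B -----
lemma pvPrefixAux_getD (arr : List Int) :
    ∀ (t : Int) (k : Nat), k < arr.length →
      (pvPrefixAux t arr).getD k 0 = t + (arr.take (k+1)).sum := by
  induction arr with
  | nil => intro t k h; simp at h
  | cons x rest ih =>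
      intro t k h
      cases k with
      | zero => simp [pvPrefixAux]
      | succ m =>
          simp only [pvPrefixAux, List.getD_cons_succ, List.take_succ_cons, List.sum_cons]
          rw [ih (t + x) m (by simpa using h)]
          ring

lemma pvPrefix_getD (arr : List Int) (j : Nat) (hj : j ≤ arr.length) :
    (pvPrefix arr).getD j 0 = pvPf arr j := by
  cases j with
  | zero => simp [pvPrefix, pvPf]
  | succ m =>
      simp only [pvPrefix, List.getD_cons_succ]
      rw [pvPrefixAux_getD arr 0 m (by omega)]
      simp [pvPf]

lemma pvAnyWindow_char (s : Int) (arr : List Int) (L : Nat) :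
    ∀ (cnt a : Nat), L ≤ a → a + cnt = arr.length + 1 →
      pvAnyWindow s (pvPrefix arr) (L : Int) (PySem.List.pyRange (a : Int) ((arr.length : Int) + 1) 1)
      = (List.range' a cnt).any (fun j => decide (s ≤ pvPf arr j - pvPf arr (j - L))) := by
  intro cnt
  induction cnt with
  | zero =>
      intro a hLa ha
      rw [PySem.List.pyRange_one_eq_nil (by omega)]
      simp [pvAnyWindow]
  | succ n ih =>
      intro a hLa ha
      have halt : (a : Int) < (arr.length : Int) + 1 := by omega
      rw [PySem.List.pyRange_one_cons halt]
      rw [List.range'_succ]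
      have han : a ≤ arr.length := by omega
      have hsub : ((a : Int) - (L : Int)) = ((a - L : Nat) : Int) := by omega
      simp only [pvAnyWindow, PySem.List.pyGetD_natCast, hsub, List.any_cons]
      rw [pvPrefix_getD arr a han, pvPrefix_getD arr (a - L) (by omega)]
      by_cases hc : s ≤ pvPf arr a - pvPf arr (a - L)
      · simp [hc]
      · rw [if_neg hc]
        have h2 : decide (s ≤ pvPf arr a - pvPf arr (a - L)) = false := by simpa using hc
        rw [h2]
        simp only [Bool.false_or]
        have : ((a : Int) + 1) = ((a + 1 : Nat) : Int) := by push_cast; ring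
        rw [this, ih (a+1) (by omega) (by omega)]

lemma pvFirstLen_char (s : Int) (arr : List Int) :
    ∀ (cnt a : Nat), 1 ≤ a → a + cnt = arr.length + 1 →
      pvFirstLen s (pvPrefix arr) (arr.length : Int) (PySem.List.pyRange (a : Int) ((arr.length : Int) + 1) 1)
      = match (List.range' a cnt).find? (fun L => pvOk s arr L) with
        | none => 0
        | some L => (L : Int) := by
  intro cnt
  induction cnt with
  | zero =>
      intro a _ ha
      rw [PySem.List.pyRange_one_eq_nil (by omega)]
      simp [pvFirstLen]
  | succ n ih =>
      intro a h1a ha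
      have halt : (a : Int) < (arr.length : Int) + 1 := by omega
      rw [PySem.List.pyRange_one_cons halt]
      rw [List.range'_succ]
      have hwin : pvAnyWindow s (pvPrefix arr) (a : Int)
          (PySem.List.pyRange (a : Int) ((arr.length : Int) + 1) 1) = pvOk s arr a := by
        rw [pvAnyWindow_char s arr a (arr.length + 1 - a) a le_rfl (by omega)]
        unfold pvOk; rfl
      by_cases hc : pvOk s arr a = true
      · rw [List.find?_cons_of_pos hc]
        simp only [pvFirstLen, hwin]
        rw [if_pos hc]
      · have hcf : pvOk s arr a = false := by simpa using hc
        rw [List.find?_cons_of_neg (by simp [hcf])]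
        simp only [pvFirstLen, hwin]
        rw [if_neg hc]
        have : ((a : Int) + 1) = ((a + 1 : Nat) : Int) := by push_cast; ring
        rw [this, ih (a+1) (by omega) (by omega)]

-- ===== VERDICT (by name: the statement is the Claim_ definition above) =====
theorem smallest_subarray_with_given_sum_brute_force_spec : Claim_equal_smallest_subarray_with_given_sum_brute_force := by
  intro s arr _
  unfold Spec_smallest_subarray_with_given_sum_brute_force
  have hA : smallest_subarray_with_given_sum_brute_force s arr
      = (match ((List.range arr.length).filterMap (pvHit s arr)).min? with
         | none => (none : Option Int)
         | some L => pvOptMin none (L : Int)).getD 0 := by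
    show (pyAOuter s arr (PySem.List.pyRange 0 (arr.length : Int) 1) none).getD 0 = _
    rw [PySem.List.pyRange_zero_nat arr.length,
        pyAOuter_char s arr (List.range arr.length) none
          (fun i hi => le_of_lt (List.mem_range.mp hi)),
        foldl_min_char s arr (List.range arr.length) none]
  have hB : smallest_subarray_with_given_sum_brute_force_alt s arr
      = match (List.range' 1 arr.length).find? (fun L => pvOk s arr L) with
        | none => 0
        | some L => (L : Int) := by
    show pvFirstLen s (pvPrefix arr) (arr.length : Int)
        (PySem.List.pyRange (((1 : Nat)) : Int) ((arr.length : Int) + 1) 1) = _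
    rw [pvFirstLen_char s arr arr.length 1 le_rfl (by omega)]
  rw [hA, hB, pvBridge s arr]
  cases (List.range' 1 arr.length).find? (fun L => pvOk s arr L) with
  | none => simp
  | some L => simp [pvOptMin]
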